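-- pv_equiv track=rewrite | github.com/SergeyShk/Project-Euler | Code/19. Counting Sundays.py | problem_19
-- ===== SOURCE A (Python) =====
-- def problem_19(start_year, stop_year, start_dow, dow):
--     counts = 0
--     for year in range(start_year, stop_year + 1):
--         for month in range(1, 13):
--             if month in [9, 4, 6, 11]:
--                 days = 30
--             elif month in [1, 3, 5, 7, 8, 10, 12]:
--                 days = 31
--             elif month == 2 and (year % 4 == 0 and year % 100 != 0 or year % 400 == 0):
--                 days = 29
--             else:
--                 days = 28
--             start_dow = (days + start_dow) % 7
--             if start_dow == 6:
--                 counts += 1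
--     return counts
-- ===== SOURCE B (Python) =====
-- def _month_lengths(year):
--     leap = year % 4 == 0 and year % 100 != 0 or year % 400 == 0
--     return (31, 29 if leap else 28, 31, 30, 31, 30, 31, 31, 30, 31, 30, 31)
--
--
-- def _simulate(year, s, nyears):
--     # run nyears consecutive years starting at `year`, weekday state s;
--     # return (number of month-starts landing on state 6, final state)
--     counts = 0
--     for y in range(year, year + nyears):
--         for days in _month_lengths(y):
--             s = (days + s) % 7
--             if s == 6:
--                 counts += 1
--     return counts, s
--
--
-- def problem_19(start_year, stop_year, start_dow, dow):
--     n = stop_year - start_year + 1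
--     if n <= 0:
--         return 0
--     cycles, rem = divmod(n, 400)
--     total = 0
--     s = start_dow
--     if cycles:
--         # Gregorian calendar repeats with period 400 years (146097 days = 0 mod 7),
--         # so every full 400-year block contributes the same count.
--         cycle_count, s = _simulate(start_year, s, 400)
--         total += cycles * cycle_count
--     rem_count, s = _simulate(start_year + 400 * cycles, s, rem)
--     return total + rem_count
-- ===== Notes on version B (the rewrite author's own statement) =====
-- stated objective: faster
-- what changed: B replaces A's year-by-year scan over the whole range by the 400-year Gregorian cycle: it simulates at most one 400-year cycle plus the remainder and multiplies the cycle's count by the number of full cycles.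
import Mathlib
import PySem

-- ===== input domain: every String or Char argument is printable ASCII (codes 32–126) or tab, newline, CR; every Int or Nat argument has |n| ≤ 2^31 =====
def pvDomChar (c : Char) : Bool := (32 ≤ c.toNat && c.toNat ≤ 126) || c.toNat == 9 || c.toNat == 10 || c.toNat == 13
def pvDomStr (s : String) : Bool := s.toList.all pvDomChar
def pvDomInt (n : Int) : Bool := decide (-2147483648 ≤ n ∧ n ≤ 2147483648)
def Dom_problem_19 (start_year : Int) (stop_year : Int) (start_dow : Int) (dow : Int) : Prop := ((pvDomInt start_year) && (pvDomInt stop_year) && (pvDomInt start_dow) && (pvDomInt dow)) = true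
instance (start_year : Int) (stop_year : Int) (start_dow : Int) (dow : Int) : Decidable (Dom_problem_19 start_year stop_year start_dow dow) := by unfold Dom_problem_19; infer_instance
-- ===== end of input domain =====

-- B replaces A's year-by-year scan by the 400-year Gregorian cycle: one cycle is
-- simulated once and multiplied by the number of full cycles, plus the remainder
-- (objective: faster — bounded work instead of O(number of years)).

-- ===== PORT A =====
def problem_19 (start_year : Int) (stop_year : Int) (start_dow : Int) (dow : Int) : Int :=
  ((PySem.List.pyRange start_year (stop_year + 1) 1).foldl
    (fun (st : Int × Int) year =>
      (PySem.List.pyRange 1 13 1).foldl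
        (fun (st : Int × Int) month =>
          let days : Int :=
            if ([9, 4, 6, 11] : List Int).contains month then 30
            else if ([1, 3, 5, 7, 8, 10, 12] : List Int).contains month then 31
            else if month == 2 && (PySem.Int.mod year 4 == 0 && PySem.Int.mod year 100 != 0 || PySem.Int.mod year 400 == 0) then 29
            else 28
          let s := PySem.Int.mod (days + st.2) 7
          if s == 6 then (st.1 + 1, s) else (st.1, s)) st)
    (0, start_dow)).1

-- ===== PORT B =====
-- port of Source B's _month_lengths
def pyMonthLengths (year : Int) : List Int :=
  let leap := PySem.Int.mod year 4 == 0 && PySem.Int.mod year 100 != 0 || PySem.Int.mod year 400 == 0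
  [31, if leap then 29 else 28, 31, 30, 31, 30, 31, 31, 30, 31, 30, 31]

-- port of Source B's _simulate: returns (counts, final state) after nyears years
def pySimulate (year : Int) (s : Int) : Nat → Int × Int
  | 0 => (0, s)
  | k + 1 =>
    let p := (pyMonthLengths year).foldl
      (fun (st : Int × Int) days =>
        let s' := PySem.Int.mod (days + st.2) 7
        (st.1 + (if s' == 6 then 1 else 0), s')) (0, s)
    let rest := pySimulate (year + 1) p.2 k
    (p.1 + rest.1, rest.2)

def problem_19_alt (start_year : Int) (stop_year : Int) (start_dow : Int) (dow : Int) : Int :=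
  let n := stop_year - start_year + 1
  if n ≤ 0 then 0
  else
    let cycles := PySem.Int.floordiv n 400
    let rem := PySem.Int.mod n 400
    let ts : Int × Int :=
      if cycles ≠ 0 then
        let p := pySimulate start_year start_dow 400
        (cycles * p.1, p.2)
      else (0, start_dow)
    ts.1 + (pySimulate (start_year + 400 * cycles) ts.2 rem.toNat).1

-- ===== PRECONDITION & SPEC =====
def Spec_problem_19 (start_year : Int) (stop_year : Int) (start_dow : Int) (dow : Int) (out : Int) : Prop := out = problem_19_alt start_year stop_year start_dow dow
instance (start_year : Int) (stop_year : Int) (start_dow : Int) (dow : Int) (out : Int) : Decidable (Spec_problem_19 start_year stop_year start_dow dow out) := by unfold Spec_problem_19; infer_instance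

-- ===== CLAIM (what is proved, stated in full; the proofs are below) =====
def Claim_equal_problem_19 : Prop := ∀ (start_year : Int) (stop_year : Int) (start_dow : Int) (dow : Int), Dom_problem_19 start_year stop_year start_dow dow → Spec_problem_19 start_year stop_year start_dow dow (problem_19 start_year stop_year start_dow dow)

-- ===== LEMMAS AND PROOFS =====

-- A's per-year inner loop, as a named step function (definitionally A's lambda)
def stepA (year : Int) (st : Int × Int) : Int × Int :=
  (PySem.List.pyRange 1 13 1).foldl
    (fun (st : Int × Int) month =>
      let days : Int :=
        if ([9, 4, 6, 11] : List Int).contains month then 30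
        else if ([1, 3, 5, 7, 8, 10, 12] : List Int).contains month then 31
        else if month == 2 && (PySem.Int.mod year 4 == 0 && PySem.Int.mod year 100 != 0 || PySem.Int.mod year 400 == 0) then 29
        else 28
      let s := PySem.Int.mod (days + st.2) 7
      if s == 6 then (st.1 + 1, s) else (st.1, s)) st

-- A's outer loop as structural recursion over a year count
def simA (year : Int) (st : Int × Int) : Nat → Int × Int
  | 0 => st
  | k + 1 => simA (year + 1) (stepA year st) k

-- B's per-year step
def stepB (year : Int) (s : Int) : Int × Int :=
  (pyMonthLengths year).foldl
    (fun (st : Int × Int) days =>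
      let s' := PySem.Int.mod (days + st.2) 7
      (st.1 + (if s' == 6 then 1 else 0), s')) (0, s)

theorem pyRange12 : PySem.List.pyRange 1 13 1 = [1,2,3,4,5,6,7,8,9,10,11,12] := by decide

theorem ite_pair (p : Prop) [Decidable p] (c s : Int) :
    (if p then (c + 1, s) else (c, s)) = (c + if p then 1 else 0, s) := by
  split <;> simp

theorem step_eq (year c s : Int) :
    stepA year (c, s) = (c + (stepB year s).1, (stepB year s).2) := by
  simp [stepA, stepB, pyMonthLengths, pyRange12, List.foldl, ite_pair]
  ring

theorem stepB_state (year s : Int) :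
    (stepB year s).2 = (s + 365 + if (4:Int) ∣ year ∧ ¬(100:Int) ∣ year ∨ (400:Int) ∣ year then 1 else 0) % 7 := by
  by_cases h : (4:Int) ∣ year ∧ ¬(100:Int) ∣ year ∨ (400:Int) ∣ year
  · simp [stepB, pyMonthLengths, List.foldl, h]
    omega
  · simp [stepB, pyMonthLengths, List.foldl, h]
    omega

theorem stepB_mod (year s : Int) : stepB year (s % 7) = stepB year s := by
  simp [stepB, pyMonthLengths, List.foldl]

theorem monthLengths_shift (year : Int) : pyMonthLengths (year + 400) = pyMonthLengths year := by
  have h4 : ((4:Int) ∣ year + 400) = ((4:Int) ∣ year) := by apply propext; omega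
  have h100 : ((100:Int) ∣ year + 400) = ((100:Int) ∣ year) := by apply propext; omega
  simp [pyMonthLengths, h4, h100]

theorem stepB_shift (year s : Int) : stepB (year + 400) s = stepB year s := by
  unfold stepB; rw [monthLengths_shift]

theorem pySimulate_succ (year s : Int) (k : Nat) :
    pySimulate year s (k + 1) =
      ((stepB year s).1 + (pySimulate (year + 1) (stepB year s).2 k).1,
       (pySimulate (year + 1) (stepB year s).2 k).2) := rfl

-- total number of days in k consecutive years starting at year y
def ydaysSum (y : Int) : Nat → Int
  | 0 => 0
  | k + 1 => (365 + if (4:Int) ∣ y ∧ ¬(100:Int) ∣ y ∨ (400:Int) ∣ y then 1 else 0) + ydaysSum (y + 1) k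

theorem ydaysSum_succ_right (k : Nat) : ∀ (y : Int),
    ydaysSum y (k + 1) = ydaysSum y k + (365 + if (4:Int) ∣ y + k ∧ ¬(100:Int) ∣ y + k ∨ (400:Int) ∣ y + k then 1 else 0) := by
  induction k with
  | zero => intro y; simp [ydaysSum]
  | succ k ih =>
    intro y
    rw [show k + 1 + 1 = (k + 1) + 1 from rfl, ydaysSum, ih (y + 1), ydaysSum]
    push_cast
    ring_nf

theorem ydaysSum_shift (y : Int) : ydaysSum (y + 1) 400 = ydaysSum y 400 := by
  have h1 : ydaysSum y 400 + (365 + if (4:Int) ∣ y + 400 ∧ ¬(100:Int) ∣ y + 400 ∨ (400:Int) ∣ y + 400 then 1 else 0)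
      = (365 + if (4:Int) ∣ y ∧ ¬(100:Int) ∣ y ∨ (400:Int) ∣ y then 1 else 0) + ydaysSum (y + 1) 400 := by
    have := ydaysSum_succ_right 400 y
    rw [show ydaysSum y 401 = (365 + if (4:Int) ∣ y ∧ ¬(100:Int) ∣ y ∨ (400:Int) ∣ y then 1 else 0) + ydaysSum (y + 1) 400 from rfl] at this
    push_cast at this ⊢
    omega
  have h4 : ((4:Int) ∣ y + 400) = ((4:Int) ∣ y) := by apply propext; omega
  have h100 : ((100:Int) ∣ y + 400) = ((100:Int) ∣ y) := by apply propext; omega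
  have h400 : ((400:Int) ∣ y + 400) = ((400:Int) ∣ y) := by apply propext; omega
  simp only [h4, h100, h400] at h1
  omega

theorem ydaysSum_400 (y : Int) : ydaysSum y 400 = ydaysSum 0 400 := by
  refine Int.induction_on y rfl (fun i ih => ?_) (fun i ih => ?_)
  · rw [← ih]; exact ydaysSum_shift i
  · rw [← ih]
    have h := ydaysSum_shift (-(i:Int) - 1)
    rw [show -(i:Int) - 1 + 1 = -(i:Int) by ring] at h
    exact h.symm

set_option maxRecDepth 4000 in
theorem ydaysSum_zero_400 : ydaysSum 0 400 = 146097 := by decide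

theorem simulate_state (k : Nat) : ∀ (y s : Int),
    (pySimulate y s (k + 1)).2 = (s + ydaysSum y (k + 1)) % 7 := by
  induction k with
  | zero =>
    intro y s
    rw [pySimulate_succ]
    simp [pySimulate, ydaysSum, stepB_state]
    generalize (if (4:Int) ∣ y ∧ ¬(100:Int) ∣ y ∨ (400:Int) ∣ y then (1:Int) else 0) = L
    omega
  | succ k ih =>
    intro y s
    rw [pySimulate_succ]
    dsimp only
    rw [ih (y + 1) (stepB y s).2, stepB_state,
      show ydaysSum y (k + 1 + 1) = (365 + if (4:Int) ∣ y ∧ ¬(100:Int) ∣ y ∨ (400:Int) ∣ y then 1 else 0) + ydaysSum (y + 1) (k + 1) from rfl]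
    generalize (if (4:Int) ∣ y ∧ ¬(100:Int) ∣ y ∨ (400:Int) ∣ y then (1:Int) else 0) = L
    generalize ydaysSum (y + 1) (k + 1) = D
    omega

theorem simulate_state_400 (y s : Int) : (pySimulate y s 400).2 = s % 7 := by
  have h := simulate_state 399 y s
  rw [show (399:Nat) + 1 = 400 from rfl, ydaysSum_400, ydaysSum_zero_400] at h
  omega

theorem simulate_shift (k : Nat) : ∀ (y s : Int), pySimulate (y + 400) s k = pySimulate y s k := by
  induction k with
  | zero => intro y s; rfl
  | succ k ih =>
    intro y s
    rw [pySimulate_succ, pySimulate_succ, stepB_shift,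
      show y + 400 + 1 = (y + 1) + 400 by ring, ih (y + 1)]

theorem simulate_shift_mul (q : Nat) : ∀ (k : Nat) (y s : Int),
    pySimulate (y + 400 * q) s k = pySimulate y s k := by
  induction q with
  | zero => intro k y s; norm_num
  | succ q ih =>
    intro k y s
    push_cast
    rw [show y + 400 * ((q:Int) + 1) = (y + 400 * (q:Int)) + 400 by ring, simulate_shift]
    have := ih k y s
    push_cast at this
    exact this

theorem simulate_mod (k : Nat) (y s : Int) :
    pySimulate y (s % 7) (k + 1) = pySimulate y s (k + 1) := by
  rw [pySimulate_succ, pySimulate_succ, stepB_mod]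

theorem simulate_add (m : Nat) : ∀ (k : Nat) (y s : Int),
    pySimulate y s (m + k) =
      ((pySimulate y s m).1 + (pySimulate (y + m) (pySimulate y s m).2 k).1,
       (pySimulate (y + m) (pySimulate y s m).2 k).2) := by
  induction m with
  | zero => intro k y s; simp [pySimulate]
  | succ m ih =>
    intro k y s
    rw [show m + 1 + k = (m + k) + 1 by omega, pySimulate_succ, ih k (y + 1) (stepB y s).2,
      pySimulate_succ]
    have hy : y + 1 + (m:Int) = y + ((m:Nat) + 1 : Nat) := by push_cast; ring
    rw [hy]
    simp only [Prod.mk.injEq]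
    exact ⟨by ring, trivial⟩

theorem count_peel (k : Nat) (y s : Int) :
    (pySimulate y s (400 + k)).1 = (pySimulate y s 400).1 + (pySimulate y s k).1 := by
  rw [simulate_add 400 k y s]
  simp only [simulate_state_400]
  have h : pySimulate (y + (400:Nat)) (s % 7) k = pySimulate y (s % 7) k := by
    have := simulate_shift k y (s % 7)
    rw [show y + ((400:Nat):Int) = y + 400 by norm_num]
    exact this
  rw [h]
  cases k with
  | zero => rfl
  | succ k => rw [simulate_mod]

theorem count_cycles (q : Nat) : ∀ (k : Nat) (y s : Int),
    (pySimulate y s (400 * q + k)).1 = (q:Int) * (pySimulate y s 400).1 + (pySimulate y s k).1 := by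
  induction q with
  | zero => intro k y s; simp
  | succ q ih =>
    intro k y s
    rw [show 400 * (q + 1) + k = 400 + (400 * q + k) by ring, count_peel, ih k y s]
    push_cast
    ring

-- A's fold over pyRange equals simA
theorem foldl_stepA (k : Nat) : ∀ (y : Int) (st : Int × Int),
    (PySem.List.pyRange y (y + (k:Int)) 1).foldl (fun st year => stepA year st) st = simA y st k := by
  induction k with
  | zero => intro y st; rw [PySem.List.pyRange_one_eq_nil (by omega)]; rfl
  | succ k ih =>
    intro y st
    rw [PySem.List.pyRange_one_cons (by push_cast; omega)]
    simp only [List.foldl_cons]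
    rw [show y + ((k:Nat) + 1 : Nat) = (y + 1) + (k:Int) by push_cast; ring, ih (y + 1)]
    rfl

theorem foldl_stepA' (y b : Int) (st : Int × Int) :
    (PySem.List.pyRange y b 1).foldl (fun st year => stepA year st) st = simA y st (b - y).toNat := by
  rcases le_or_gt b y with h | h
  · rw [PySem.List.pyRange_one_eq_nil h, show (b - y).toNat = 0 by omega]; rfl
  · rw [show b = y + ((b - y).toNat : Int) by omega]
    rw [foldl_stepA ((b - y).toNat) y st, show (y + ((b - y).toNat : Int) - y).toNat = (b - y).toNat by omega]

theorem simA_eq (k : Nat) : ∀ (y c s : Int),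
    simA y (c, s) k = (c + (pySimulate y s k).1, (pySimulate y s k).2) := by
  induction k with
  | zero => intro y c s; simp [simA, pySimulate]
  | succ k ih =>
    intro y c s
    rw [simA, step_eq, ih (y + 1), pySimulate_succ]
    simp only [Prod.mk.injEq]
    exact ⟨by ring, trivial⟩

theorem problem_19_as_sim (sy ty sd d : Int) :
    problem_19 sy ty sd d = (pySimulate sy sd (ty + 1 - sy).toNat).1 := by
  have h : problem_19 sy ty sd d
      = ((PySem.List.pyRange sy (ty + 1) 1).foldl (fun st year => stepA year st) (0, sd)).1 := rfl
  rw [h, foldl_stepA', simA_eq]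
  ring

-- ===== VERDICT (by name: the statement is the Claim_ definition above) =====
theorem problem_19_spec : Claim_equal_problem_19 := by
  intro sy ty sd d _
  unfold Spec_problem_19 problem_19_alt
  rw [problem_19_as_sim]
  dsimp only
  by_cases hn : ty - sy + 1 ≤ 0
  · rw [if_pos hn, show (ty + 1 - sy).toNat = 0 by omega]
    rfl
  · rw [if_neg hn]
    have hfd : PySem.Int.floordiv (ty - sy + 1) 400 = (ty - sy + 1) / 400 :=
      PySem.Int.floordiv_eq_ediv_of_pos (by norm_num)
    have hmd : PySem.Int.mod (ty - sy + 1) 400 = (ty - sy + 1) % 400 :=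
      PySem.Int.mod_eq_emod_of_pos (by norm_num)
    rw [hfd, hmd]
    have hN : (ty + 1 - sy).toNat = 400 * ((ty - sy + 1) / 400).toNat + ((ty - sy + 1) % 400).toNat := by
      omega
    rw [hN, count_cycles (((ty - sy + 1) / 400).toNat) (((ty - sy + 1) % 400).toNat) sy sd]
    by_cases hq : (ty - sy + 1) / 400 = 0
    · rw [if_neg (by simp [hq])]
      dsimp only
      rw [hq, show ((0:Int)).toNat = 0 from rfl]
      norm_num
    · rw [if_pos hq]
      dsimp only
      rw [simulate_state_400]
      have hq0 : 0 ≤ (ty - sy + 1) / 400 := by omega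
      have hcast : sy + 400 * ((ty - sy + 1) / 400) = sy + 400 * ((((ty - sy + 1) / 400).toNat : Nat) : Int) := by
        omega
      rw [hcast, simulate_shift_mul (((ty - sy + 1) / 400).toNat)]
      have hC : (((ty - sy + 1) / 400).toNat : Int) = (ty - sy + 1) / 400 := by omega
      rw [hC]
      cases hr : ((ty - sy + 1) % 400).toNat with
      | zero =>
        have h1 : (pySimulate sy sd 0).1 = 0 := rfl
        have h2 : (pySimulate sy (sd % 7) 0).1 = 0 := rfl
        rw [h1, h2]
      | succ k => rw [simulate_mod]
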